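-- pv_equiv track=rewrite | github.com/Jason003/Interview_Code_Python | Airbnb/hilbertCurve.py | hilbertCurve
-- ===== SOURCE A (Python) =====
-- def hilbertCurve(x, y, iter):
--     if not iter:
--         return 1
--     len = 1 << (iter - 1)
--     num = 1 << (2 * (iter - 1))
--     if x >= len and y >= len:  # 3 Shape is identical with previous iteration
--         return 2 * num + hilbertCurve(x - len, y - len, iter - 1)
--     elif x < len and y >= len:  # 2 Shape is identical with previous iteration
--         return num + hilbertCurve(x, y - len, iter - 1)
--     elif x < len and y < len:  # 1 Clock-wise rotate 90
--         return hilbertCurve(y, x, iter - 1)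
--     else:  # 4 Anti-Clockwise rotate 90
--         return 3 * num + hilbertCurve(len - y - 1, 2 * len - x - 1, iter - 1)
-- ===== SOURCE B (Python) =====
-- def hilbertCurve(x, y, iter):
--     total = 1
--     for i in range(iter, 0, -1):
--         half = 1 << (i - 1)
--         if y >= half:
--             if x >= half:
--                 total += 2 << (2 * (i - 1))
--                 x -= half
--                 y -= half
--             else:
--                 total += 1 << (2 * (i - 1))
--                 y -= half
--         else:
--             if x >= half:
--                 total += 3 << (2 * (i - 1))
--                 x, y = half - y - 1, 2 * half - x - 1
--             else:
--                 x, y = y, x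
--     return total
-- ===== Notes on version B (the rewrite author's own statement) =====
-- stated objective: alternative
-- what changed: Replaced the recursive descent (each call prefixes a quadrant offset onto its recursive result) with an iterative per-level loop that keeps a running total starting at 1, decides the quadrant by nesting first on y then on x (instead of A's flat four-way chain), and adds the offsets as direct shifts while updating x,y in place.
import Mathlib
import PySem

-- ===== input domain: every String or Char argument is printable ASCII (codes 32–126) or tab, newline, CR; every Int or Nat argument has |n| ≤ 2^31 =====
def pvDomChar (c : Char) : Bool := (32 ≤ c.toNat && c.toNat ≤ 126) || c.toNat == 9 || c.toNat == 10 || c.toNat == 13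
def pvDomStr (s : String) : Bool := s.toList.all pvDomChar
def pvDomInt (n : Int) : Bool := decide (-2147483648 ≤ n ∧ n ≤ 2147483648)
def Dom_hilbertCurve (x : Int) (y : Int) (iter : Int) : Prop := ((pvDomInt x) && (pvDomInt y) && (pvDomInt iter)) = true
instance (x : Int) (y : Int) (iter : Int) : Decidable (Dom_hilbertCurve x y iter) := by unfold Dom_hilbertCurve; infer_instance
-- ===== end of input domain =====

-- B replaces A's recursive descent with an iterative per-level loop (nested y-then-x branching, shift offsets, running total): alternative decomposition, same cost.


-- ===== PORT A =====
-- A's recursion descends on iter; ported with iter.toNat as the structural argument (Pre_ requires 0 ≤ iter).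
def hcA (x : Int) (y : Int) : Nat → Int
  | 0 => 1
  | n + 1 =>
    let len : Int := 2 ^ n
    let num : Int := 2 ^ (2 * n)
    if x ≥ len ∧ y ≥ len then 2 * num + hcA (x - len) (y - len) n
    else if x < len ∧ y ≥ len then num + hcA x (y - len) n
    else if x < len ∧ y < len then hcA y x n
    else 3 * num + hcA (len - y - 1) (2 * len - x - 1) n

def hilbertCurve (x : Int) (y : Int) (iter : Int) : Int := hcA x y iter.toNat

-- ===== PORT B =====
-- B's loop body at level k = i - 1 (one iteration over the state (x, y, total)).
def hcStep (k : Nat) (st : Int × Int × Int) : Int × Int × Int :=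
  let half : Int := 2 ^ k
  if st.2.1 ≥ half then
    if st.1 ≥ half then (st.1 - half, st.2.1 - half, st.2.2 + 2 * 2 ^ (2 * k))
    else (st.1, st.2.1 - half, st.2.2 + 2 ^ (2 * k))
  else
    if st.1 ≥ half then (half - st.2.1 - 1, 2 * half - st.1 - 1, st.2.2 + 3 * 2 ^ (2 * k))
    else (st.2.1, st.1, st.2.2)

-- the loop runs i = iter, …, 1, i.e. levels k = iter-1, …, 0
def hilbertCurve_alt (x : Int) (y : Int) (iter : Int) : Int :=
  ((List.range iter.toNat).reverse.foldl (fun st k => hcStep k st) (x, y, 1)).2.2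

-- ===== PRECONDITION & SPEC =====
-- Pre_ excludes iter < 0, on which A raises ValueError (negative shift count).
def Pre_hilbertCurve (x : Int) (y : Int) (iter : Int) : Prop := 0 ≤ iter
instance (x : Int) (y : Int) (iter : Int) : Decidable (Pre_hilbertCurve x y iter) := by unfold Pre_hilbertCurve; infer_instance
def pvWitness_hilbertCurve : Int × Int × Int := (3, 5, 3)

def Spec_hilbertCurve (x : Int) (y : Int) (iter : Int) (out : Int) : Prop := out = hilbertCurve_alt x y iter
instance (x : Int) (y : Int) (iter : Int) (out : Int) : Decidable (Spec_hilbertCurve x y iter out) := by unfold Spec_hilbertCurve; infer_instance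

-- ===== CLAIM =====
def Claim_equal_hilbertCurve : Prop := ∀ (x : Int) (y : Int) (iter : Int), Dom_hilbertCurve x y iter → Pre_hilbertCurve x y iter → Spec_hilbertCurve x y iter (hilbertCurve x y iter)

-- ===== LEMMAS AND PROOFS =====
-- B's running total collects exactly the offsets A prefixes to its recursive results.
theorem foldl_hcStep_eq (n : Nat) : ∀ (x y t : Int),
    ((List.range n).reverse.foldl (fun st k => hcStep k st) (x, y, t)).2.2 = t - 1 + hcA x y n := by
  induction n with
  | zero => intro x y t; simp [hcA]
  | succ n ih =>
    intro x y t
    have ih' : ∀ st : Int × Int × Int,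
        ((List.range n).reverse.foldl (fun st k => hcStep k st) st).2.2 = st.2.2 - 1 + hcA st.1 st.2.1 n := by
      rintro ⟨a, b, c⟩; exact ih a b c
    rw [List.range_succ, List.reverse_append]
    simp only [List.reverse_singleton, List.singleton_append, List.foldl_cons]
    rw [ih']
    simp only [hcStep, hcA]
    split_ifs <;> first | (exfalso; omega) | (simp; try ring)

-- ===== VERDICT =====
theorem hilbertCurve_spec : Claim_equal_hilbertCurve := by
  intro x y iter _ _
  unfold Spec_hilbertCurve hilbertCurve hilbertCurve_alt
  rw [foldl_hcStep_eq]; ring
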